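-- pv_equiv track=rewrite | github.com/Shr2020/Artificial-Intelligence-Algorithms | DPLL solver/BNFToCNF.py | find_lowest_score_operand
-- ===== SOURCE A (Python) =====
-- operator_score = {'!': 4, '|': 2, '&': 3, "=>": 1, "<=>" : 0}
--
-- operators = ["!", "|", "&", "=>", "<=>"]
--
-- def find_lowest_score_operand(llist):
--     score = 10
--     index = -1
--     length = len(llist)
--     while length > 0:
--         if operators.count(llist[length-1]) > 0:
--             if operator_score[llist[length-1]] < score:
--                 score = operator_score[llist[length-1]]
--                 index = length - 1
--         length = length -1
--     return (index, score)
-- ===== SOURCE B (Python) =====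
-- operator_score = {'!': 4, '|': 2, '&': 3, "=>": 1, "<=>": 0}
--
-- operators = ["!", "|", "&", "=>", "<=>"]
--
-- def find_lowest_score_operand(llist):
--     candidates = [(operator_score[x], i) for i, x in enumerate(llist) if x in operator_score]
--     if not candidates:
--         return (-1, 10)
--     min_score = min(s for s, i in candidates)
--     index = max(i for s, i in candidates if s == min_score)
--     return (index, min_score)
-- ===== Notes on version B (the rewrite author's own statement) =====
-- stated objective: idiomatic
-- what changed: Replaces the backwards while-loop with a running strict-minimum accumulator by a collect-then-reduce decomposition: build the list of (score, index) candidates once, then take min of the scores and the max index achieving it (which reproduces the rightmost tie-break).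
import Mathlib
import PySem

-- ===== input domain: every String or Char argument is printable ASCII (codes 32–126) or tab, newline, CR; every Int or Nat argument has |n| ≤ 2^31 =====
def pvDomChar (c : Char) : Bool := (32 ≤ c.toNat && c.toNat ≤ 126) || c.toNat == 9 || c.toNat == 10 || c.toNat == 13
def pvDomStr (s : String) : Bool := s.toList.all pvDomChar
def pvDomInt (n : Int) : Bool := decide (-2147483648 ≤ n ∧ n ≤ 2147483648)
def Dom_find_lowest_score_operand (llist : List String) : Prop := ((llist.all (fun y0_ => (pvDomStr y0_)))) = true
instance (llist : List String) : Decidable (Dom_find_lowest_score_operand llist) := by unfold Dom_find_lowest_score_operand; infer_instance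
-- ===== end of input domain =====

-- B collects the (score, index) candidates once and reduces with min/max instead of A's
-- backwards while-loop carrying a running strict minimum (objective: idiomatic; same cost).

-- ===== PORT A =====
def operator_score : PySem.Dict String Int :=
  PySem.Dict.ofList [("!", 4), ("|", 2), ("&", 3), ("=>", 1), ("<=>", 0)]

def operators : List String := ["!", "|", "&", "=>", "<=>"]

-- the while-loop of A: `length` counts down; `score`/`index` are the running state
def flsA_loop (llist : List String) : Nat → Int → Int → Int × Int
  | 0, score, index => (index, score)
  | k + 1, score, index =>
    -- llist[length-1]; in range whenever the loop is entered from find_lowest_score_operand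
    let x := (PySem.List.pyGet? llist (k : Int)).getD ""
    if 0 < PySem.List.count operators x then
      let s := (PySem.Dict.get? operator_score x).getD 0  -- operator_score[llist[length-1]], present by the guard
      if s < score then flsA_loop llist k s (k : Int)
      else flsA_loop llist k score index
    else flsA_loop llist k score index

def find_lowest_score_operand (llist : List String) : Int × Int :=
  flsA_loop llist llist.length 10 (-1)

-- ===== PORT B =====
def fls_candidates (llist : List String) : List (Int × Int) :=
  (PySem.List.enumerate llist).filterMap
    (fun p => (PySem.Dict.get? operator_score p.2).map (fun s => (s, p.1)))

def find_lowest_score_operand_alt (llist : List String) : Int × Int :=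
  let c := fls_candidates llist
  if c = [] then (-1, 10)
  else
    let min_score := (PySem.List.min? (c.map (fun p => p.1)) (fun s => s)).getD 0
    let index := (PySem.List.max? ((c.filter (fun p => p.1 == min_score)).map (fun p => p.2)) (fun i => i)).getD 0
    (index, min_score)

-- ===== PRECONDITION & SPEC =====
def Spec_find_lowest_score_operand (llist : List String) (out : Int × Int) : Prop := out = find_lowest_score_operand_alt llist
instance (llist : List String) (out : Int × Int) : Decidable (Spec_find_lowest_score_operand llist out) := by unfold Spec_find_lowest_score_operand; infer_instance

-- ===== CLAIM (what is proved, stated in full; the proofs are below) =====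
def Claim_equal_find_lowest_score_operand : Prop := ∀ (llist : List String), Dom_find_lowest_score_operand llist → Spec_find_lowest_score_operand llist (find_lowest_score_operand llist)

-- ===== LEMMAS AND PROOFS =====

-- the "best" candidate of a list of (score, index) pairs: minimal score, ties to the later pair
def bestOf : List (Int × Int) → Option (Int × Int)
  | [] => none
  | x :: xs =>
    match bestOf xs with
    | none => some x
    | some b => if x.1 < b.1 then some x else some b

theorem bestOf_eq_none_iff (c : List (Int × Int)) : bestOf c = none ↔ c = [] := by
  cases c with
  | nil => simp [bestOf]
  | cons x xs =>
    simp only [bestOf]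
    cases bestOf xs with
    | none => simp
    | some b => by_cases h : x.1 < b.1 <;> simp [h]

theorem bestOf_append_single (c : List (Int × Int)) (p : Int × Int) :
    bestOf (c ++ [p]) =
      match bestOf c with
      | none => some p
      | some b => if b.1 < p.1 then some b else some p := by
  induction c with
  | nil => simp [bestOf]
  | cons x xs ih =>
    simp only [List.cons_append, bestOf, ih]
    cases h : bestOf xs with
    | none =>
      by_cases h3 : x.1 < p.1 <;> simp [h3]
    | some b =>
      by_cases h1 : x.1 < b.1 <;> by_cases h2 : b.1 < p.1 <;> by_cases h3 : x.1 < p.1 <;>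
        first
          | (exfalso; omega)
          | simp [h1, h2, h3]

theorem bestOf_mem (c : List (Int × Int)) : ∀ b, bestOf c = some b → b ∈ c := by
  induction c with
  | nil => intro b h; simp [bestOf] at h
  | cons x xs ih =>
    intro b h
    simp only [bestOf] at h
    cases h' : bestOf xs with
    | none =>
      rw [h'] at h; dsimp only at h
      injection h with h; subst h
      exact List.mem_cons_self
    | some b' =>
      rw [h'] at h; dsimp only at h
      split_ifs at h with hlt
      · injection h with h; subst h
        exact List.mem_cons_self
      · injection h with h; subst h
        exact List.mem_cons_of_mem _ (ih _ h')

theorem bestOf_min (c : List (Int × Int)) : ∀ b, bestOf c = some b →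
    ∀ q ∈ c, b.1 ≤ q.1 := by
  induction c with
  | nil => simp
  | cons x xs ih =>
    intro b h q hq
    simp only [bestOf] at h
    cases h' : bestOf xs with
    | none =>
      rw [h'] at h; dsimp only at h
      injection h with h; subst h
      rw [(bestOf_eq_none_iff xs).mp h'] at hq
      simp at hq; simp [hq]
    | some b' =>
      rw [h'] at h; dsimp only at h
      have hmin := ih b' h'
      rcases List.mem_cons.mp hq with rfl | hq'
      · split_ifs at h with hlt <;> injection h with h <;> subst h
        · omega
        · exact le_of_not_gt hlt
      · have := hmin q hq'
        split_ifs at h with hlt <;> injection h with h <;> subst h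
        · omega
        · exact this

-- on a tie the later (right-hand) pair wins; with strictly increasing indices that is the larger index
theorem bestOf_tie (c : List (Int × Int)) (hp : c.Pairwise (fun p q => p.2 < q.2)) :
    ∀ b, bestOf c = some b → ∀ q ∈ c, q.1 = b.1 → q.2 ≤ b.2 := by
  induction c with
  | nil => simp
  | cons x xs ih =>
    intro b h q hq hq1
    simp only [bestOf] at h
    cases h' : bestOf xs with
    | none =>
      rw [h'] at h; dsimp only at h
      injection h with h; subst h
      rw [(bestOf_eq_none_iff xs).mp h'] at hq
      simp at hq; simp [hq]
    | some b' =>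
      rw [h'] at h; dsimp only at h
      have hmem := bestOf_mem xs b' h'
      rcases List.mem_cons.mp hq with rfl | hq'
      · split_ifs at h with hlt <;> injection h with h <;> subst h
        · omega
        · -- the kept pair b' comes after q = x in the list, so q.2 < b'.2
          exact le_of_lt ((List.pairwise_cons.mp hp).1 _ hmem)
      · split_ifs at h with hlt <;> injection h with h <;> subst h
        · -- b = x is strictly below b', the minimum of xs ∋ q, yet q.1 = x.1: impossible
          have := bestOf_min xs b' h' q hq'
          omega
        · exact ih (List.pairwise_cons.mp hp).2 b' h' q hq' hq1

-- how A's loop result is expressed through the best candidate of the prefix it has scanned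
def flsFinish (b : Option (Int × Int)) (score index : Int) : Int × Int :=
  match b with
  | none => (index, score)
  | some (s, i) => if s < score then (i, s) else (index, score)

theorem os_items :
    operator_score.items = [("!", 4), ("|", 2), ("&", 3), ("=>", 1), ("<=>", 0)] := by rfl

theorem get?_os_cases (x : String) (s : Int) (h : PySem.Dict.get? operator_score x = some s) :
    (x = "!" ∧ s = 4) ∨ (x = "|" ∧ s = 2) ∨ (x = "&" ∧ s = 3) ∨
      (x = "=>" ∧ s = 1) ∨ (x = "<=>" ∧ s = 0) := by
  simp only [PySem.Dict.get?, os_items, List.find?] at h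
  by_cases e1 : "!" = x; · simp [← e1, eq_comm] at h ⊢; omega
  rw [show (("!" == x) = false) by simp [e1]] at h
  by_cases e2 : "|" = x; · simp [← e2, eq_comm] at h ⊢; omega
  rw [show (("|" == x) = false) by simp [e2]] at h
  by_cases e3 : "&" = x; · simp [← e3, eq_comm] at h ⊢; omega
  rw [show (("&" == x) = false) by simp [e3]] at h
  by_cases e4 : "=>" = x; · simp [← e4, eq_comm] at h ⊢; omega
  rw [show (("=>" == x) = false) by simp [e4]] at h
  by_cases e5 : "<=>" = x; · simp [← e5, eq_comm] at h ⊢; omega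
  rw [show (("<=>" == x) = false) by simp [e5]] at h
  simp at h

theorem count_pos_iff_get?_isSome (x : String) :
    (0 < PySem.List.count operators x) ↔ (PySem.Dict.get? operator_score x).isSome := by
  rw [PySem.List.count_eq, List.count_pos_iff]
  constructor
  · intro h
    simp only [operators, List.mem_cons, List.not_mem_nil, or_false] at h
    rcases h with rfl | rfl | rfl | rfl | rfl <;> decide
  · intro h
    obtain ⟨s, hs⟩ := Option.isSome_iff_exists.mp h
    rcases get?_os_cases x s hs with ⟨rfl, _⟩ | ⟨rfl, _⟩ | ⟨rfl, _⟩ | ⟨rfl, _⟩ | ⟨rfl, _⟩ <;>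
      simp [operators]

theorem get?_score_lt_ten {x : String} {s : Int}
    (h : PySem.Dict.get? operator_score x = some s) : s < 10 := by
  rcases get?_os_cases x s h with ⟨_, rfl⟩ | ⟨_, rfl⟩ | ⟨_, rfl⟩ | ⟨_, rfl⟩ | ⟨_, rfl⟩ <;> omega

theorem candidates_take_succ (llist : List String) (k : Nat) (hk : k < llist.length) :
    fls_candidates (llist.take (k + 1)) =
      fls_candidates (llist.take k) ++
        (match PySem.Dict.get? operator_score llist[k] with
         | none => []
         | some s => [(s, (k : Int))]) := by
  have ht : llist.take (k + 1) = llist.take k ++ [llist[k]] := by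
    rw [List.take_add_one, List.getElem?_eq_getElem hk]; rfl
  rw [fls_candidates, ht, PySem.List.enumerate_append, List.filterMap_append]
  have hl : (llist.take k).length = k := by simp [List.length_take]; omega
  rw [hl]
  cases h : PySem.Dict.get? operator_score llist[k] <;>
    simp [PySem.List.enumerate, fls_candidates, h]

theorem flsA_loop_eq_finish (llist : List String) :
    ∀ k, k ≤ llist.length → ∀ score index,
      flsA_loop llist k score index =
        flsFinish (bestOf (fls_candidates (llist.take k))) score index := by
  intro k
  induction k with
  | zero => intro _ score index; simp [flsA_loop, fls_candidates, bestOf, flsFinish]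
  | succ k ih =>
    intro hk score index
    have hklt : k < llist.length := hk
    have hx : (PySem.List.pyGet? llist (k : Int)).getD "" = llist[k] := by
      simp [PySem.List.pyGet?_natCast, List.getElem?_eq_getElem hklt]
    simp only [flsA_loop, hx]
    by_cases hc : 0 < PySem.List.count operators llist[k]
    · have hs : (PySem.Dict.get? operator_score llist[k]).isSome :=
        (count_pos_iff_get?_isSome _).mp hc
      obtain ⟨sk, hsk⟩ := Option.isSome_iff_exists.mp hs
      rw [candidates_take_succ llist k hklt, hsk, bestOf_append_single]
      simp only [hc, if_true, Option.getD_some]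
      cases hb : bestOf (fls_candidates (llist.take k)) with
      | none =>
        by_cases h1 : sk < score <;>
          simp [h1, ih (le_of_lt hklt), hb, flsFinish]
      | some b =>
        obtain ⟨s, i⟩ := b
        by_cases h1 : sk < score <;> by_cases h2 : s < sk <;>
          simp only [h1, h2, if_true, if_false, ih (le_of_lt hklt), hb, flsFinish] <;>
          split_ifs <;> first | rfl | (exfalso; omega)
    · simp only [hc, if_false]
      cases hg : PySem.Dict.get? operator_score llist[k] with
      | none =>
        rw [candidates_take_succ llist k hklt, hg]
        simp [ih (le_of_lt hklt)]
      | some s =>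
        exfalso
        exact hc ((count_pos_iff_get?_isSome _).mpr (by rw [hg]; rfl))

theorem candidates_pairwise (llist : List String) :
    (fls_candidates llist).Pairwise (fun p q => p.2 < q.2) := by
  have hp := PySem.List.pairwise_lt_enumerate llist 0
  refine List.Pairwise.filterMap _ ?_ hp
  intro a a' hab b hb b' hb'
  simp only [Option.map_eq_some_iff] at hb hb'
  obtain ⟨sa, _, rfl⟩ := hb
  obtain ⟨sb, _, rfl⟩ := hb'
  exact hab

theorem candidates_score_lt_ten {llist : List String} {p : Int × Int}
    (h : p ∈ fls_candidates llist) : p.1 < 10 := by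
  simp only [fls_candidates, List.mem_filterMap] at h
  obtain ⟨q, _, hq⟩ := h
  simp only [Option.map_eq_some_iff] at hq
  obtain ⟨s, hs, rfl⟩ := hq
  exact get?_score_lt_ten hs

-- ===== VERDICT (by name: the statement is the Claim_ definition above) =====
theorem find_lowest_score_operand_spec : Claim_equal_find_lowest_score_operand := by
  intro llist _
  unfold Spec_find_lowest_score_operand find_lowest_score_operand find_lowest_score_operand_alt
  rw [flsA_loop_eq_finish llist llist.length le_rfl, List.take_length]
  cases hb : bestOf (fls_candidates llist) with
  | none =>
    rw [(bestOf_eq_none_iff _).mp hb]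
    simp [flsFinish]
  | some b =>
    obtain ⟨s, i⟩ := b
    have hmem : (s, i) ∈ fls_candidates llist := bestOf_mem _ _ hb
    have hne : fls_candidates llist ≠ [] := by
      intro h; rw [h] at hmem; simp at hmem
    have hlt : s < 10 := candidates_score_lt_ten hmem
    simp only [flsFinish, hlt, if_true, if_neg hne]
    -- min of the scores is s
    have hs_mem : s ∈ (fls_candidates llist).map (fun p => p.1) :=
      List.mem_map.mpr ⟨(s, i), hmem, rfl⟩
    have hmap_ne : (fls_candidates llist).map (fun p => p.1) ≠ [] := by
      simpa using hne
    have hm_some : (PySem.List.min? ((fls_candidates llist).map (fun p => p.1)) (fun s => s)).isSome := by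
      rw [Option.isSome_iff_ne_none]
      intro hnone
      exact hmap_ne ((PySem.List.min?_eq_none_iff _ _).mp hnone)
    obtain ⟨m, hm⟩ := Option.isSome_iff_exists.mp hm_some
    have hm_mem := PySem.List.min?_mem hm
    have hm_min := PySem.List.min?_isMin hm
    have hms : m = s := by
      have h1 : m ≤ s := hm_min s hs_mem
      have h2 : s ≤ m := by
        obtain ⟨q, hq, rfl⟩ := List.mem_map.mp hm_mem
        exact bestOf_min _ _ hb q hq
      omega
    subst hms
    rw [hm]
    simp only [Option.getD_some]
    -- max index among minimal scores is i
    have hi_mem : i ∈ ((fls_candidates llist).filter (fun p => p.1 == m)).map (fun p => p.2) :=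
      List.mem_map.mpr ⟨(m, i), List.mem_filter.mpr ⟨hmem, by simp⟩, rfl⟩
    have hfil_ne : ((fls_candidates llist).filter (fun p => p.1 == m)).map (fun p => p.2) ≠ [] := by
      intro h; rw [h] at hi_mem; simp at hi_mem
    have hmx_some : (PySem.List.max? (((fls_candidates llist).filter (fun p => p.1 == m)).map (fun p => p.2)) (fun i => i)).isSome := by
      rw [Option.isSome_iff_ne_none]
      intro hnone
      exact hfil_ne ((PySem.List.max?_eq_none_iff _ _).mp hnone)
    obtain ⟨mx, hmx⟩ := Option.isSome_iff_exists.mp hmx_some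
    have hmx_mem := PySem.List.max?_mem hmx
    have hmx_max := PySem.List.max?_isMax hmx
    have hmxi : mx = i := by
      have h1 : i ≤ mx := hmx_max i hi_mem
      have h2 : mx ≤ i := by
        obtain ⟨q, hq, rfl⟩ := List.mem_map.mp hmx_mem
        obtain ⟨hqmem, hqs⟩ := List.mem_filter.mp hq
        exact bestOf_tie _ (candidates_pairwise llist) _ hb q hqmem (by simpa using hqs)
      omega
    subst hmxi
    rw [hmx]
    simp
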